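-- pv_equiv track=rewrite | github.com/gikf/advent-of-code | advent-of-code-2015/day 21/main.py | pick_equipment
-- ===== SOURCE A (Python) =====
-- def pick_equipment(categories, cur_pick):
--     """Pick one item from each of categories."""
--     if not categories:
--         return [cur_pick]
--     items = categories[0]
--     picks = []
--     for item in items:
--         next_picks = pick_equipment(categories[1:], cur_pick + item)
--         picks.extend(next_picks)
--     return picks
-- ===== SOURCE B (Python) =====
-- def pick_equipment(categories, cur_pick):
--     """Pick one item from each of categories."""
--     tails = [[]]
--     for items in reversed(categories):
--         tails = [item + t for item in items for t in tails]
--     return [cur_pick + t for t in tails]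
-- ===== Notes on version B (the rewrite author's own statement) =====
-- stated objective: alternative
-- what changed: Builds the product back-to-front: a right fold accumulates all suffix combinations starting from [[]], and cur_pick is prepended once at the end, instead of A's head recursion that threads cur_pick through every call.
import Mathlib
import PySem

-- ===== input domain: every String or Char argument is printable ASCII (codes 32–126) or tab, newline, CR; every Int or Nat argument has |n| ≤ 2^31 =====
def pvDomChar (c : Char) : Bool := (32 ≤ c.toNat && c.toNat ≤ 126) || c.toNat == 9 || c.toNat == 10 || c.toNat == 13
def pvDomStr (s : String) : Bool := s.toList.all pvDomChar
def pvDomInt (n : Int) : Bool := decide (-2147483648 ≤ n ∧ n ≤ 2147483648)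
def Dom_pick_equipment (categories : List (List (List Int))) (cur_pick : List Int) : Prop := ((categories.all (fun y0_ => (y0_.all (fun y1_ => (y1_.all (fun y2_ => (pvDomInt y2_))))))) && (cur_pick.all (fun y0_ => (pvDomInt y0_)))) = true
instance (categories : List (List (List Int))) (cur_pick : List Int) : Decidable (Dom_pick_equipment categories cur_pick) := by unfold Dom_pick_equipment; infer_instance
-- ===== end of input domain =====

-- B builds the product back-to-front (right fold of suffix combinations, cur_pick prepended once at the end) instead of A's head recursion (objective: alternative).

-- ===== PORT A =====
def pick_equipment (categories : List (List (List Int))) (cur_pick : List Int) : List (List Int) :=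
  match categories with
  | [] => [cur_pick]
  | items :: rest =>
    -- picks = []; for item in items: picks.extend(pick_equipment(categories[1:], cur_pick + item))
    items.foldl (fun picks item => picks ++ pick_equipment rest (cur_pick ++ item)) []

-- ===== PORT B =====
def pick_equipment_alt (categories : List (List (List Int))) (cur_pick : List Int) : List (List Int) :=
  -- tails = [[]]; for items in reversed(categories): tails = [item + t for item in items for t in tails]
  -- (a loop over the reversed list updating the accumulator = a right fold)
  let tails := categories.foldr
    (fun items tails => items.flatMap (fun item => tails.map (fun t => item ++ t))) [[]]
  -- return [cur_pick + t for t in tails]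
  tails.map (fun t => cur_pick ++ t)

-- ===== PRECONDITION & SPEC =====
def Spec_pick_equipment (categories : List (List (List Int))) (cur_pick : List Int) (out : List (List Int)) : Prop := out = pick_equipment_alt categories cur_pick
instance (categories : List (List (List Int))) (cur_pick : List Int) (out : List (List Int)) : Decidable (Spec_pick_equipment categories cur_pick out) := by unfold Spec_pick_equipment; infer_instance

-- ===== CLAIM (what is proved, stated in full; the proofs are below) =====
def Claim_equal_pick_equipment : Prop := ∀ (categories : List (List (List Int))) (cur_pick : List Int), Dom_pick_equipment categories cur_pick → Spec_pick_equipment categories cur_pick (pick_equipment categories cur_pick)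

-- ===== LEMMAS AND PROOFS =====

theorem pick_equipment_eq_alt (cats : List (List (List Int))) (cur : List Int) :
    pick_equipment cats cur = pick_equipment_alt cats cur := by
  induction cats generalizing cur with
  | nil => simp [pick_equipment, pick_equipment_alt]
  | cons items rest ih =>
      show items.foldl (fun picks item => picks ++ pick_equipment rest (cur ++ item)) []
        = pick_equipment_alt (items :: rest) cur
      rw [PySem.List.foldl_append_eq_flatMap]
      simp only [List.nil_append]
      unfold pick_equipment_alt
      simp only [List.foldr_cons, List.map_flatMap, List.map_map]
      refine List.flatMap_congr ?_
      intro item _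
      rw [ih]
      unfold pick_equipment_alt
      simp [Function.comp, List.append_assoc]

-- ===== VERDICT (by name: the statement is the Claim_ definition above) =====
theorem pick_equipment_spec : Claim_equal_pick_equipment := by
  intro cats cur _
  exact pick_equipment_eq_alt cats cur
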